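-- pv_equiv track=rewrite | github.com/punnawitskv/MYCODE | .other/damm_stupid_chat_couldn't_give_me_an_answer_so_i'll_do_it_myself/novel_name.py | abbreviation_with_name
-- ===== SOURCE A (Python) =====
-- def abbreviation_with_name(name_input, abbreviation_input):
--     count = 0
--     new_name = ''
--     while count < len(name_input):
--         if count < len(abbreviation_input):
--             new_name += abbreviation_input[count]
--         else:
--             new_name += name_input[count]
--         count += 1
--     return new_name
-- ===== SOURCE B (Python) =====
-- def abbreviation_with_name(name_input, abbreviation_input):
--     return abbreviation_input[:len(name_input)] + name_input[len(abbreviation_input):]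
-- ===== Notes on version B (the rewrite author's own statement) =====
-- stated objective: simpler
-- what changed: Replaces the index-counter while loop with per-character string appends by a closed-form concatenation of two slices derived from the two lengths.
import Mathlib
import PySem

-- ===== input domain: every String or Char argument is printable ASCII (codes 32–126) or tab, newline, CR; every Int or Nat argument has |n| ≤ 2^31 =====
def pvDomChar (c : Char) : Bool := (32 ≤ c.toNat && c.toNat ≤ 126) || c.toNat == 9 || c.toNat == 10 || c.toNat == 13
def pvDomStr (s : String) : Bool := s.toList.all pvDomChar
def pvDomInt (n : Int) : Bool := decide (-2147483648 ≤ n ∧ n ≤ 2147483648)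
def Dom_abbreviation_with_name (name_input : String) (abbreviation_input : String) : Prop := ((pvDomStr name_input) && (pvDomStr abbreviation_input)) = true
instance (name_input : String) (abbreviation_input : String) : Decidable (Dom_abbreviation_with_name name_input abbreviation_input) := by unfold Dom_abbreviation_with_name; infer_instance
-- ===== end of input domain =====

-- B replaces A's index-counter loop of single-character appends by a closed-form
-- concatenation of two slices (objective: simpler).

-- ===== PORT A =====
-- the while loop: count scans name_input, appending abbreviation_input[count]
-- while it exists, else name_input[count] (indices are always in range there,
-- so the in-range getElem is exact)
def awnLoop (nameL abbrL : List Char) (count : Nat) (acc : List Char) : List Char :=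
  if h : count < nameL.length then
    if h2 : count < abbrL.length then
      awnLoop nameL abbrL (count + 1) (acc ++ [abbrL[count]])
    else
      awnLoop nameL abbrL (count + 1) (acc ++ [nameL[count]])
  else acc
termination_by nameL.length - count

def abbreviation_with_name (name_input : String) (abbreviation_input : String) : String :=
  String.ofList (awnLoop name_input.toList abbreviation_input.toList 0 [])

-- ===== PORT B =====
def abbreviation_with_name_alt (name_input : String) (abbreviation_input : String) : String :=
  String.ofList (PySem.List.slice abbreviation_input.toList none (some (name_input.toList.length : Int))
             ++ PySem.List.slice name_input.toList (some (abbreviation_input.toList.length : Int)) none)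

-- ===== PRECONDITION & SPEC =====
def Spec_abbreviation_with_name (name_input : String) (abbreviation_input : String) (out : String) : Prop := out = abbreviation_with_name_alt name_input abbreviation_input
instance (name_input : String) (abbreviation_input : String) (out : String) : Decidable (Spec_abbreviation_with_name name_input abbreviation_input out) := by unfold Spec_abbreviation_with_name; infer_instance

-- ===== CLAIM (what is proved, stated in full; the proofs are below) =====
def Claim_equal_abbreviation_with_name : Prop := ∀ (name_input : String) (abbreviation_input : String), Dom_abbreviation_with_name name_input abbreviation_input → Spec_abbreviation_with_name name_input abbreviation_input (abbreviation_with_name name_input abbreviation_input)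

-- ===== LEMMAS AND PROOFS =====
theorem awnLoop_eq (nameL abbrL : List Char) (count : Nat) (acc : List Char) :
    awnLoop nameL abbrL count acc
      = acc ++ (abbrL.take nameL.length ++ nameL.drop abbrL.length).drop count := by
  fun_induction awnLoop nameL abbrL count acc with
  | case1 count acc h h2 ih =>
    rw [ih]
    have hlen : count < (abbrL.take nameL.length ++ nameL.drop abbrL.length).length := by
      simp; omega
    rw [List.drop_eq_getElem_cons hlen]
    have : (abbrL.take nameL.length ++ nameL.drop abbrL.length)[count] = abbrL[count] := by
      rw [List.getElem_append_left (by simp; omega)]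
      simp
    rw [this]; simp
  | case2 count acc h h2 ih =>
    rw [ih]
    have hlen : count < (abbrL.take nameL.length ++ nameL.drop abbrL.length).length := by
      simp; omega
    rw [List.drop_eq_getElem_cons hlen]
    have : (abbrL.take nameL.length ++ nameL.drop abbrL.length)[count]
        = nameL[count - abbrL.length + abbrL.length]'(by omega) := by
      rw [List.getElem_append_right (by simp; omega)]
      rw [List.getElem_drop]
      congr 1
      simp; omega
    rw [this]
    simp; congr 2; omega
  | case3 count acc h =>
    have hd : (abbrL.take nameL.length ++ nameL.drop abbrL.length).drop count = [] := by
      apply List.drop_eq_nil_of_le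
      simp; omega
    simp [hd]

-- ===== VERDICT (by name: the statement is the Claim_ definition above) =====
theorem abbreviation_with_name_spec : Claim_equal_abbreviation_with_name := by
  intro name abbr _
  unfold Spec_abbreviation_with_name abbreviation_with_name abbreviation_with_name_alt
  rw [awnLoop_eq]
  rw [PySem.List.slice_to_natCast, PySem.List.slice_from_natCast]
  simp
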